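-- pv_equiv track=rewrite | github.com/Camelia7v/CN | CN-Tema3/bonus/methods.py | convert_vectors_in_sparse_matrix
-- ===== SOURCE A (Python) =====
-- def create_empty_list_of_dicts(n):
--     return [{} for i in range(0, n)]
--
-- def convert_vectors_in_sparse_matrix(a, b, c, n, q, p):
--     matrix = create_empty_list_of_dicts(n)
--     for i in range(0, len(matrix)):
--         for j in range(0, len(matrix)):
--             if i == j:
--                 matrix[i][j] = a[i]
--             if j - i == q:
--                 matrix[i][j] = b[i]
--             if i - j == p:
--                 matrix[i][j] = c[j]
--     return matrix
-- ===== SOURCE B (Python) =====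
-- def convert_vectors_in_sparse_matrix(a, b, c, n, q, p):
--     matrix = []
--     for i in range(n):
--         cols = [i]
--         if 0 <= i + q < n and q != 0:
--             cols.append(i + q)
--         if 0 <= i - p < n and p != 0 and i - p != i + q:
--             cols.append(i - p)
--         cols.sort()
--         matrix.append({j: (c[j] if i - j == p else b[i] if j - i == q else a[i])
--                        for j in cols})
--     return matrix
-- ===== Notes on version B (the rewrite author's own statement) =====
-- stated objective: faster
-- what changed: A fills each of the n rows by scanning all n columns and testing each for the three diagonal conditions; B builds each row directly from its at most three diagonal columns (i, i+q, i-p when in range), sorted, with the same a-then-b-then-c overwrite precedence, removing the inner scan.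
import Mathlib
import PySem

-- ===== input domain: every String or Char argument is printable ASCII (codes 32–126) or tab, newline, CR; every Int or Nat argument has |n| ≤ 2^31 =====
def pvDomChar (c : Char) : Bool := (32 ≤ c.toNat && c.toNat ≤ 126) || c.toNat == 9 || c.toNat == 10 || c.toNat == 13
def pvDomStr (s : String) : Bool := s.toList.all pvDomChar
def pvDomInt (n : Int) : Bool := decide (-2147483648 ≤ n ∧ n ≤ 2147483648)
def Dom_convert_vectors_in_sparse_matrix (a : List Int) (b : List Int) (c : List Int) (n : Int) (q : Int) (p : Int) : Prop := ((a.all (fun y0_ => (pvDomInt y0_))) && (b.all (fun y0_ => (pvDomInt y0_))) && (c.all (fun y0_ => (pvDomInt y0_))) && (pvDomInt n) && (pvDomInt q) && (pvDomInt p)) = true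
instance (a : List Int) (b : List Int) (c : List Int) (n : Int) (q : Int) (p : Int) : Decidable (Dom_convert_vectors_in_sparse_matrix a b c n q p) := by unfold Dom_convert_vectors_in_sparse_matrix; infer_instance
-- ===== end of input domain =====

-- B replaces A's O(n) inner scan over all columns by a direct O(1) build of each row's
-- (at most three) diagonal cells, sorted by column; objective: faster (asymptotic).

-- ===== PORT A =====
-- one iteration of A's inner `for j` loop on row i (conditions in A's order, overwrite in place)
def pvAStep (a b c : List Int) (q p i : Int) (row : PySem.Dict Int Int) (j : Int) : PySem.Dict Int Int :=
  let row := if i = j then row.insert j (PySem.List.pyGetD a i 0) else row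
  let row := if j - i = q then row.insert j (PySem.List.pyGetD b i 0) else row
  if i - j = p then row.insert j (PySem.List.pyGetD c j 0) else row

def convert_vectors_in_sparse_matrix (a : List Int) (b : List Int) (c : List Int) (n : Int) (q : Int) (p : Int) : List (List (Int × Int)) :=
  -- matrix = [{} for _ in range(n)]; len(matrix) = len(range(0, n)); each row i is filled by the j-loop
  (PySem.List.pyRange 0 n 1).map (fun i =>
    ((PySem.List.pyRange 0 n 1).foldl (pvAStep a b c q p i) PySem.Dict.empty).items)

-- ===== PORT B =====
-- the value stored at cell (i, j): last writer in a → b → c order wins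
def pvVal (a b c : List Int) (q p i j : Int) : Int :=
  if i - j = p then PySem.List.pyGetD c j 0
  else if j - i = q then PySem.List.pyGetD b i 0
  else PySem.List.pyGetD a i 0

-- the (distinct) columns of row i that carry a cell
def pvCols (n q p i : Int) : List Int :=
  let cols := [i]
  let cols := if 0 ≤ i + q ∧ i + q < n ∧ q ≠ 0 then cols ++ [i + q] else cols
  if 0 ≤ i - p ∧ i - p < n ∧ p ≠ 0 ∧ i - p ≠ i + q then cols ++ [i - p] else cols

def pvBRow (a b c : List Int) (n q p i : Int) : List (Int × Int) :=
  (PySem.List.sorted (pvCols n q p i) (fun x => x) false).map (fun j => (j, pvVal a b c q p i j))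

def convert_vectors_in_sparse_matrix_alt (a : List Int) (b : List Int) (c : List Int) (n : Int) (q : Int) (p : Int) : List (List (Int × Int)) :=
  (PySem.List.pyRange 0 n 1).map (fun i => pvBRow a b c n q p i)

-- ===== PRECONDITION & SPEC =====
-- Pre_ excludes exactly the inputs where Python A raises IndexError: some accessed index
-- (both Lean ports total those accesses with pyGetD default 0, so the equivalence proof below
-- happens to hold without the hypothesis; Pre_ delimits where port A models Python A)
-- of a, b or c is out of range (a[i] for i < n; b[i] when i+q lands in [0,n); c[i-p] when i-p lands in [0,n)).
def Pre_convert_vectors_in_sparse_matrix (a : List Int) (b : List Int) (c : List Int) (n : Int) (q : Int) (p : Int) : Prop :=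
  0 < n → (n ≤ (a.length : Int)
    ∧ (min (n-1) (n-1-q) < max 0 (-q) ∨ min (n-1) (n-1-q) < (b.length : Int))
    ∧ (min (n-1) (n-1-p) < max 0 (-p) ∨ min (n-1) (n-1-p) < (c.length : Int)))
instance (a : List Int) (b : List Int) (c : List Int) (n : Int) (q : Int) (p : Int) : Decidable (Pre_convert_vectors_in_sparse_matrix a b c n q p) := by unfold Pre_convert_vectors_in_sparse_matrix; infer_instance
def pvWitness_convert_vectors_in_sparse_matrix : List Int × List Int × List Int × Int × Int × Int := ([1, 2], [3, 4], [5, 6], 2, 1, 1)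
def Spec_convert_vectors_in_sparse_matrix (a : List Int) (b : List Int) (c : List Int) (n : Int) (q : Int) (p : Int) (out : List (List (Int × Int))) : Prop := out = convert_vectors_in_sparse_matrix_alt a b c n q p
instance (a : List Int) (b : List Int) (c : List Int) (n : Int) (q : Int) (p : Int) (out : List (List (Int × Int))) : Decidable (Spec_convert_vectors_in_sparse_matrix a b c n q p out) := by unfold Spec_convert_vectors_in_sparse_matrix; infer_instance

-- ===== CLAIM (what is proved, stated in full; the proofs are below) =====
def Claim_equal_convert_vectors_in_sparse_matrix : Prop := ∀ (a : List Int) (b : List Int) (c : List Int) (n : Int) (q : Int) (p : Int), Dom_convert_vectors_in_sparse_matrix a b c n q p → Pre_convert_vectors_in_sparse_matrix a b c n q p → Spec_convert_vectors_in_sparse_matrix a b c n q p (convert_vectors_in_sparse_matrix a b c n q p)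

-- ===== LEMMAS AND PROOFS =====


theorem pvContains_false {d : PySem.Dict Int Int} {j : Int} (hj : j ∉ d.keys) : d.contains j = false := by
  rw [← Bool.not_eq_true, PySem.Dict.contains_iff_mem_keys]; exact hj

-- inserting again at the last-appended key only replaces the last value
theorem pvInsert_last_items (e d : PySem.Dict Int Int) (j v w : Int)
    (he : e.items = d.items ++ [(j, v)]) (hj : j ∉ d.keys) :
    (e.insert j w).items = d.items ++ [(j, w)] := by
  have hce : e.contains j = true := by
    rw [PySem.Dict.contains_iff_mem_keys]
    simp [PySem.Dict.keys, he]
  rw [PySem.Dict.items_insert_of_contains e w hce, he, List.map_append]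
  congr 1
  · refine (List.map_congr_left ?_).trans (List.map_id _)
    intro x hx
    refine if_neg ?_
    simp only [beq_iff_eq]
    exact fun h => hj (h ▸ PySem.Dict.mem_keys_of_mem_items d hx)
  · simp

-- one pvAStep on a fresh column j appends (j, pvVal …) iff one of the three conditions fires
theorem pvAStep_items (a b c : List Int) (q p i j : Int) (d : PySem.Dict Int Int) (hj : j ∉ d.keys) :
    (pvAStep a b c q p i d j).items
      = d.items ++ (if i = j ∨ j - i = q ∨ i - j = p then [(j, pvVal a b c q p i j)] else []) := by
  have hc : d.contains j = false := pvContains_false hj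
  by_cases h1 : i = j <;> by_cases h2 : j - i = q <;> by_cases h3 : i - j = p
  · simp only [pvAStep, pvVal, if_pos h1, if_pos h2, if_pos h3,
      if_pos (show i = j ∨ j - i = q ∨ i - j = p from Or.inl h1)]
    exact pvInsert_last_items _ _ _ _ _
      (pvInsert_last_items _ _ _ _ _ (PySem.Dict.items_insert_of_not_contains d _ hc) hj) hj
  · simp only [pvAStep, pvVal, if_pos h1, if_pos h2, if_neg h3,
      if_pos (show i = j ∨ j - i = q ∨ i - j = p from Or.inl h1)]
    exact pvInsert_last_items _ _ _ _ _ (PySem.Dict.items_insert_of_not_contains d _ hc) hj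
  · simp only [pvAStep, pvVal, if_pos h1, if_neg h2, if_pos h3,
      if_pos (show i = j ∨ j - i = q ∨ i - j = p from Or.inl h1)]
    exact pvInsert_last_items _ _ _ _ _ (PySem.Dict.items_insert_of_not_contains d _ hc) hj
  · simp only [pvAStep, pvVal, if_pos h1, if_neg h2, if_neg h3,
      if_pos (show i = j ∨ j - i = q ∨ i - j = p from Or.inl h1)]
    exact PySem.Dict.items_insert_of_not_contains d _ hc
  · simp only [pvAStep, pvVal, if_neg h1, if_pos h2, if_pos h3,
      if_pos (show i = j ∨ j - i = q ∨ i - j = p from Or.inr (Or.inl h2))]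
    exact pvInsert_last_items _ _ _ _ _ (PySem.Dict.items_insert_of_not_contains d _ hc) hj
  · simp only [pvAStep, pvVal, if_neg h1, if_pos h2, if_neg h3,
      if_pos (show i = j ∨ j - i = q ∨ i - j = p from Or.inr (Or.inl h2))]
    exact PySem.Dict.items_insert_of_not_contains d _ hc
  · simp only [pvAStep, pvVal, if_neg h1, if_neg h2, if_pos h3,
      if_pos (show i = j ∨ j - i = q ∨ i - j = p from Or.inr (Or.inr h3))]
    exact PySem.Dict.items_insert_of_not_contains d _ hc
  · simp only [pvAStep, if_neg h1, if_neg h2, if_neg h3,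
      if_neg (show ¬(i = j ∨ j - i = q ∨ i - j = p) by tauto)]
    simp

theorem pvAStep_keys (a b c : List Int) (q p i j : Int) (d : PySem.Dict Int Int) (hj : j ∉ d.keys) :
    (pvAStep a b c q p i d j).keys
      = d.keys ++ (if i = j ∨ j - i = q ∨ i - j = p then [j] else []) := by
  have h := pvAStep_items a b c q p i j d hj
  simp only [PySem.Dict.keys, h, List.map_append]
  split_ifs <;> simp

-- A's inner loop, characterised: it appends the qualifying columns in increasing order
theorem pvFoldA (a b c : List Int) (q p i : Int) (L : List Int) :
    ∀ (d : PySem.Dict Int Int), L.Pairwise (· < ·) → (∀ k ∈ d.keys, ∀ j ∈ L, k < j) →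
    (L.foldl (pvAStep a b c q p i) d).items
      = d.items ++ (L.filter (fun j => decide (i = j ∨ j - i = q ∨ i - j = p))).map
          (fun j => (j, pvVal a b c q p i j)) := by
  induction L with
  | nil => simp
  | cons j L ih =>
    intro d hpw hlt
    have hj : j ∉ d.keys := fun h => lt_irrefl j (hlt j h j (List.mem_cons_self))
    have hpw' := List.pairwise_cons.mp hpw
    rw [List.foldl_cons, ih (pvAStep a b c q p i d j) hpw'.2 ?_]
    · rw [pvAStep_items a b c q p i j d hj, List.filter_cons]
      by_cases hK : i = j ∨ j - i = q ∨ i - j = p <;>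
        simp [hK, List.append_assoc]
    · intro k hk j' hj'
      rw [pvAStep_keys a b c q p i j d hj] at hk
      rcases List.mem_append.mp hk with hk | hk
      · exact hlt k hk j' (List.mem_cons_of_mem j hj')
      · have : k = j := by
          by_cases hK : i = j ∨ j - i = q ∨ i - j = p <;> simp [hK] at hk
          exact hk
        exact this ▸ hpw'.1 j' hj' 

theorem pvCols_sorted (n q p i : Int) (hi0 : 0 ≤ i) (hin : i < n) :
    PySem.List.sorted (pvCols n q p i) (fun x => x) false
      = (PySem.List.pyRange 0 n 1).filter (fun j => decide (i = j ∨ j - i = q ∨ i - j = p)) := by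
  have hnf : ((PySem.List.pyRange 0 n 1).filter
      (fun j => decide (i = j ∨ j - i = q ∨ i - j = p))).Nodup :=
    (PySem.List.nodup_pyRange_one 0 n).filter _
  have hnc : (pvCols n q p i).Nodup := by
    unfold pvCols
    split_ifs <;> simp <;> omega
  apply PySem.List.sorted_eq_of_perm_of_pairwise_lt
  · rw [List.perm_ext_iff_of_nodup hnf hnc]
    intro x
    simp only [List.mem_filter, PySem.List.mem_pyRange_one, decide_eq_true_eq, pvCols]
    split_ifs <;> simp <;> omega
  · exact (PySem.List.pairwise_lt_pyRange_one 0 n).filter _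

theorem pvRow_eq (a b c : List Int) (n q p i : Int) (hi0 : 0 ≤ i) (hin : i < n) :
    ((PySem.List.pyRange 0 n 1).foldl (pvAStep a b c q p i) PySem.Dict.empty).items
      = pvBRow a b c n q p i := by
  rw [pvFoldA a b c q p i (PySem.List.pyRange 0 n 1) PySem.Dict.empty
      (PySem.List.pairwise_lt_pyRange_one 0 n) (by simp [PySem.Dict.keys, PySem.Dict.empty])]
  rw [pvBRow, pvCols_sorted n q p i hi0 hin]
  simp [PySem.Dict.empty]

-- ===== VERDICT (by name: the statement is the Claim_ definition above) =====
theorem convert_vectors_in_sparse_matrix_spec : Claim_equal_convert_vectors_in_sparse_matrix := by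
  intro a b c n q p _ _
  unfold Spec_convert_vectors_in_sparse_matrix convert_vectors_in_sparse_matrix convert_vectors_in_sparse_matrix_alt
  refine List.map_congr_left ?_
  intro i hi
  rw [PySem.List.mem_pyRange_one] at hi
  exact pvRow_eq a b c n q p i hi.1 hi.2
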